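-- pv_equiv track=rewrite | github.com/visanalexandru/ASM-Sudoku-Solver | tests/test.py | to_grid
-- ===== SOURCE A (Python) =====
-- def to_grid(s):
--     column=0
--     result=""
--     for x in s:
--         result+=str(x)+" "
--         column+=1
--         if column==9:
--             result+='\n'
--             column=0
--     return result
-- ===== SOURCE B (Python) =====
-- def to_grid(s):
--     rows = [s[i:i + 9] for i in range(0, len(s), 9)]
--     return ''.join(' '.join(map(str, r)) + (' \n' if len(r) == 9 else ' ') for r in rows)
-- ===== Notes on version B (the rewrite author's own statement) =====
-- stated objective: idiomatic
-- what changed: Replaces the element-by-element counter loop with string concatenation by a row-oriented chunk-then-join: slice the input into rows of 9 and ' '.join each row, appending the newline exactly for full rows.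
import Mathlib
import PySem

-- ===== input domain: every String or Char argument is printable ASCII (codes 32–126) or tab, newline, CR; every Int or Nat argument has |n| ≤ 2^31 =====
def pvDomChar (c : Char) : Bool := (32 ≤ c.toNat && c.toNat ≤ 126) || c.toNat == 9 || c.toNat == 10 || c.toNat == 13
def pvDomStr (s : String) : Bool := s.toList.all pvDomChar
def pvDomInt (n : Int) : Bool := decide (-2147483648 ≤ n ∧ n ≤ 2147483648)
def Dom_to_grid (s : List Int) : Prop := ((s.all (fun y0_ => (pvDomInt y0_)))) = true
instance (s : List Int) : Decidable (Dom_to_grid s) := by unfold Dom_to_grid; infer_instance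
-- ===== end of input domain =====

-- B replaces A's per-element counter loop (string += with a column counter) by a row-oriented
-- chunk-then-join decomposition: slice into rows of 9, ' '.join each row, concatenate.


-- ===== PORT A =====
-- one loop iteration: result += str(x) + " "; column += 1; if column == 9: result += '\n'; column = 0
def pvStepA (st : Nat × String) (x : Int) : Nat × String :=
  let result := st.2 ++ (PySem.Int.toStr x ++ " ")
  let column := st.1 + 1
  if column == 9 then (0, result ++ "\n") else (column, result)

def to_grid (s : List Int) : String := (s.foldl pvStepA (0, "")).2

-- ===== PORT B =====
-- rows = [s[i:i+9] for i in range(0, len(s), 9)]  (chunking by 9)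
def pvChunks : List Int → List (List Int)
  | [] => []
  | x :: rest => ((x :: rest).take 9) :: pvChunks ((x :: rest).drop 9)
termination_by s => s.length
decreasing_by simp

-- ' '.join(map(str, r)) + (' \n' if len(r) == 9 else ' ')
def pvRow (r : List Int) : String :=
  PySem.Str.join " " (r.map PySem.Int.toStr) ++ (if r.length == 9 then " \n" else " ")

def to_grid_alt (s : List Int) : String := PySem.Str.join "" ((pvChunks s).map pvRow)

-- ===== PRECONDITION & SPEC =====
def Spec_to_grid (s : List Int) (out : String) : Prop := out = to_grid_alt s
instance (s : List Int) (out : String) : Decidable (Spec_to_grid s out) := by unfold Spec_to_grid; infer_instance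

-- ===== CLAIM (what is proved, stated in full; the proofs are below) =====
def Claim_equal_to_grid : Prop := ∀ (s : List Int), Dom_to_grid s → Spec_to_grid s (to_grid s)

-- ===== LEMMAS AND PROOFS =====
-- the characters A's loop appends for a run of elements
def pvFlat (xs : List Int) : List Char := xs.flatMap (fun x => PySem.Int.toChars x ++ [' '])

lemma pvFlat_cons (x : Int) (xs : List Int) :
    pvFlat (x :: xs) = PySem.Int.toChars x ++ [' '] ++ pvFlat xs := by
  simp [pvFlat]

-- A's fold over at most a row's worth of elements, from column c
lemma pvFoldA_chunk (xs : List Int) : ∀ (c : Nat) (r : String), c + xs.length ≤ 9 → c < 9 →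
    xs.foldl pvStepA (c, r) =
      (if c + xs.length = 9 then 0 else c + xs.length,
       String.ofList (r.toList ++ pvFlat xs ++ (if c + xs.length = 9 then ['\n'] else []))) := by
  induction xs with
  | nil =>
    intro c r h hc
    have h9 : ¬ (c + ([] : List Int).length = 9) := by simp; omega
    rw [List.foldl_nil, if_neg h9, if_neg h9]
    refine Prod.ext (by simp) ?_
    apply String.toList_inj.mp
    simp [pvFlat]
  | cons x xs ih =>
    intro c r h hc
    simp only [List.foldl_cons]
    by_cases h9 : c + 1 = 9
    · have hxs : xs = [] := by
        have : xs.length = 0 := by simp at h; omega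
        exact List.eq_nil_of_length_eq_zero this
      subst hxs
      have hcase : c + ([x] : List Int).length = 9 := by simpa using h9
      simp only [pvStepA, h9, List.foldl_nil, beq_self_eq_true, hcase, if_pos]
      refine Prod.ext rfl ?_
      apply String.toList_inj.mp
      simp [pvFlat, PySem.Int.toList_toStr]
    · have hstep : pvStepA (c, r) x = (c + 1, r ++ (PySem.Int.toStr x ++ " ")) := by
        have hb : ((c + 1 : Nat) == 9) = false := by simp; omega
        simp [pvStepA, hb]
      rw [hstep, ih (c + 1) _ (by simp at h ⊢; omega) (by omega)]
      have hlen : (c + 1) + xs.length = c + (x :: xs).length := by simp; omega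
      rw [hlen]
      congr 1
      apply String.toList_inj.mp
      simp [pvFlat_cons, PySem.Int.toList_toStr]

-- the row string, as characters: a trailing space after each element, newline iff full
lemma pvRow_toList (r : List Int) (hne : r ≠ []) :
    (pvRow r).toList = pvFlat r ++ (if r.length = 9 then ['\n'] else []) := by
  suffices h : (PySem.Str.join " " (r.map PySem.Int.toStr)).toList ++ [' '] = pvFlat r by
    by_cases h9 : r.length = 9 <;>
      simp [pvRow, h9, ← h, show (" \n" : String).toList = [' ', '\n'] from rfl,
            show (" " : String).toList = [' '] from rfl]
  induction r with
  | nil => exact absurd rfl hne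
  | cons x xs ih =>
    cases xs with
    | nil =>
      simp [PySem.Str.toList_join, PySem.Chars.join_singleton, pvFlat, PySem.Int.toList_toStr]
    | cons y ys =>
      have := ih (by simp)
      simp only [List.map_cons, PySem.Str.toList_join, PySem.Chars.join_cons_cons] at this ⊢
      rw [pvFlat_cons, ← this]
      simp [PySem.Int.toList_toStr]

lemma pvJoin_empty_sep (l : List (List Char)) : PySem.Chars.join [] l = l.flatten := by
  induction l with
  | nil => simp [PySem.Chars.join_nil]
  | cons p rest ih =>
    cases rest with
    | nil => simp [PySem.Chars.join_singleton]
    | cons q rs => rw [PySem.Chars.join_cons_cons]; simp at ih ⊢; rw [ih]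

lemma pvAlt_toList (s : List Int) :
    (to_grid_alt s).toList = ((pvChunks s).map (fun r => (pvRow r).toList)).flatten := by
  simp [to_grid_alt, PySem.Str.toList_join, pvJoin_empty_sep,
        show ("" : String).toList = [] from rfl, List.map_map]
  rfl

lemma pvMain (n : Nat) : ∀ (s : List Int) (r : String), s.length ≤ n →
    (s.foldl pvStepA (0, r)).2.toList = r.toList ++ (to_grid_alt s).toList := by
  induction n with
  | zero =>
    intro s r h
    have : s = [] := List.eq_nil_of_length_eq_zero (by omega)
    subst this
    rw [to_grid_alt, pvChunks]; simp [PySem.Str.toList_join, PySem.Chars.join_nil]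
  | succ n ih =>
    intro s r h
    cases s with
    | nil => rw [to_grid_alt, pvChunks]; simp [PySem.Str.toList_join, PySem.Chars.join_nil]
    | cons x rest =>
      set s := x :: rest with hs
      have hsplit : s = s.take 9 ++ s.drop 9 := (List.take_append_drop 9 s).symm
      have htlen : (s.take 9).length = min 9 s.length := by simp
      have hchunk : pvChunks s = (s.take 9) :: pvChunks (s.drop 9) := by
        rw [hs, pvChunks]
      conv_lhs => rw [hsplit]
      rw [List.foldl_append]
      have h9 : min 9 s.length ≤ 9 := by omega
      rw [pvFoldA_chunk (s.take 9) 0 r (by omega) (by omega)]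
      by_cases hge : 9 ≤ s.length
      · have hmin : min 9 s.length = 9 := by omega
        have hcase : 0 + (s.take 9).length = 9 := by rw [htlen, hmin]
        rw [if_pos hcase, if_pos hcase]
        have hd : (s.drop 9).length ≤ n := by
          simp only [List.length_drop]
          rw [hs] at h ⊢; simp at h ⊢; omega
        rw [ih (s.drop 9) _ hd]
        rw [pvAlt_toList s, hchunk]
        simp only [List.map_cons, List.flatten_cons]
        rw [pvRow_toList (s.take 9) (by
              intro hnil
              have := congrArg List.length hnil
              rw [htlen, hmin] at this; simp at this)]
        rw [if_pos (by rw [htlen, hmin]), pvAlt_toList (s.drop 9)]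
        simp
      · have hlt : s.length < 9 := by omega
        have hmin : min 9 s.length = s.length := by omega
        have hne9 : s.length ≠ 9 := by omega
        have hcase : ¬ (0 + (s.take 9).length = 9) := by rw [htlen, hmin]; omega
        rw [if_neg hcase, if_neg hcase]
        have hdrop : s.drop 9 = [] := List.drop_eq_nil_of_le (by omega)
        rw [hdrop]
        simp only [List.foldl_nil]
        rw [pvAlt_toList s, hchunk, hdrop]
        simp only [pvChunks, List.map_cons, List.map_nil, List.flatten_cons, List.flatten_nil]
        rw [pvRow_toList (s.take 9) (by rw [hs]; simp)]
        rw [List.take_of_length_le (by omega), if_neg hne9]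
        simp

-- ===== VERDICT (by name: the statement is the Claim_ definition above) =====
theorem to_grid_spec : Claim_equal_to_grid := by
  intro s _
  unfold Spec_to_grid to_grid
  apply String.toList_inj.mp
  rw [pvMain s.length s "" (le_refl _)]
  rfl
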